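-- pv_equiv track=rewrite | github.com/Shershebnev/BioInfo | SNPs.py | BWT_first_col
-- ===== SOURCE A (Python) =====
-- def BWT_first_col(string):
--
--     rotations = []
--
--     # generates all rotations
--     for i in range(len(string)):
--         rotations.append(string[i : ] + string[ : i])
--
--     rotations =  sorted(rotations)
--
--     # take last symbol from each string in rotations list, generating BWT
--     word = ''
--     for item in rotations:
--         word += item[0]
--
--     return word
-- ===== SOURCE B (Python) =====
-- def BWT_first_col(string):
--     # Counting sort: histogram the characters, then emit each character
--     # (in sorted order) repeated by its count.  No rotations are built.
--     counts = {}
--     for ch in string: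
--         counts[ch] = counts.get(ch, 0) + 1
--     word = ''
--     for ch in sorted(counts):
--         word += ch * counts[ch]
--     return word
-- ===== Notes on version B (the rewrite author's own statement) =====
-- stated objective: faster
-- what changed: Replaces building and comparison-sorting all n rotations with a counting sort: one histogram pass over the string, then emission of each character repeated by its count in sorted key order.
import Mathlib
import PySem

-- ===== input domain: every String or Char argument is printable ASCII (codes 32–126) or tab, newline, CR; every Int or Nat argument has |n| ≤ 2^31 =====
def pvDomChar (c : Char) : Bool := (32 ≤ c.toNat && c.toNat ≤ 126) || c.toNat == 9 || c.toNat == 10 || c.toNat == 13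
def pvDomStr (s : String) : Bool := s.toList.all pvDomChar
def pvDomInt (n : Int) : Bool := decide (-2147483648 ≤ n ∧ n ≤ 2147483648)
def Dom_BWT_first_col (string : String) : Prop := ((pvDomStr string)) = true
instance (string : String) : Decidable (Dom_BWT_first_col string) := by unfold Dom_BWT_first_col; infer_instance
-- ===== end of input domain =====

-- B replaces generating and comparison-sorting all rotations with a counting sort
-- (histogram pass, then emission in sorted key order); equal output proved for all inputs.

-- ===== PORT A =====
-- Note on instances: Python compares the rotation strings lexicographically; the
-- `sorted` call is elaborated at the lexicographic order `List.instLinearOrder.toLT`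
-- on `List Char` (Python's string order) so that the library order lemmas apply.
def BWT_first_col (string : String) : String :=
  let cs := string.toList
  -- for i in range(len(string)): rotations.append(string[i:] + string[:i])
  let rotations : List (List Char) :=
    (PySem.List.pyRange 0 (cs.length : Int)).foldl
      (fun acc i => acc ++ [PySem.List.slice cs (some i) none ++ PySem.List.slice cs none (some i)]) []
  -- rotations = sorted(rotations)
  let rotations := @PySem.List.sorted (List Char) (List Char)
    List.instLinearOrder.toLT LinearOrder.toDecidableLT rotations (fun x => x) false
  -- word = ''; for item in rotations: word += item[0]
  -- item[0] is `pyGet? item 0`; the `.getD ' '` default is unreachable: every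
  -- rotation of a nonempty string is nonempty, and an empty string yields no rotations.
  let word : List Char :=
    rotations.foldl (fun acc item => acc ++ [(PySem.List.pyGet? item 0).getD ' ']) []
  String.ofList word

-- ===== PORT B =====
def BWT_first_col_alt (string : String) : String :=
  -- counts = {}; for ch in string: counts[ch] = counts.get(ch, 0) + 1
  let counts : PySem.Dict Char Int :=
    string.toList.foldl (fun d ch => d.insert ch (d.getD ch 0 + 1)) PySem.Dict.empty
  -- word = ''; for ch in sorted(counts): word += ch * counts[ch]
  let word : List Char :=
    (PySem.List.sorted counts.keys (fun x => x) false).foldl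
      (fun acc ch => acc ++ PySem.List.pyRepeat [ch] (counts.getD ch 0)) []
  String.ofList word

-- ===== PRECONDITION & SPEC =====
def Spec_BWT_first_col (string : String) (out : String) : Prop := out = BWT_first_col_alt string
instance (string : String) (out : String) : Decidable (Spec_BWT_first_col string out) := by unfold Spec_BWT_first_col; infer_instance

-- ===== CLAIM (what is proved, stated in full; the proofs are below) =====
def Claim_equal_BWT_first_col : Prop := ∀ (string : String), Dom_BWT_first_col string → Spec_BWT_first_col string (BWT_first_col string)

-- ===== LEMMAS AND PROOFS =====

-- the first character of the i-th rotation is cs[i]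
theorem pv_head_rot (cs : List Char) (i : Nat) (h : i < cs.length) :
    (PySem.List.pyGet? (PySem.List.slice cs (some (i : Int)) none ++ PySem.List.slice cs none (some (i : Int))) 0).getD ' '
      = cs[i] := by
  rw [PySem.List.slice_from_natCast, PySem.List.slice_to_natCast,
      List.drop_eq_getElem_cons h, List.cons_append, PySem.List.pyGet?_zero_cons]
  rfl

-- the loop over range(n) builds exactly the list of rotations, as a map over range
theorem pv_rotations_eq (cs : List Char) :
    (PySem.List.pyRange 0 (cs.length : Int)).foldl
      (fun acc i => acc ++ [PySem.List.slice cs (some i) none ++ PySem.List.slice cs none (some i)]) []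
    = (List.range cs.length).map
        (fun (k : Nat) => PySem.List.slice cs (some (k : Int)) none ++ PySem.List.slice cs none (some (k : Int))) := by
  rw [PySem.List.pyRange_zero_natCast, PySem.List.foldl_append_singleton_eq_map,
      List.map_map, List.nil_append]
  rfl

-- the first characters of the (unsorted) rotations are exactly the characters of cs
theorem pv_heads_unsorted (cs : List Char) :
    ((List.range cs.length).map
        (fun (k : Nat) => PySem.List.slice cs (some (k : Int)) none ++ PySem.List.slice cs none (some (k : Int)))).map
      (fun item => (PySem.List.pyGet? item 0).getD ' ') = cs := by
  apply List.ext_getElem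
  · simp
  · intro k h1 h2
    simp only [List.getElem_map, List.getElem_range]
    exact pv_head_rot cs k (by simpa using h2)

-- head is monotone for the lexicographic order on nonempty lists
theorem pv_head_mono (a b : List Char) (ha : a ≠ []) (hb : b ≠ [])
    (h : @LE.le (List Char) List.instLinearOrder.toLE a b) :
    (PySem.List.pyGet? a 0).getD ' ' ≤ (PySem.List.pyGet? b 0).getD ' ' := by
  obtain ⟨x, xs, rfl⟩ := List.exists_cons_of_ne_nil ha
  obtain ⟨y, ys, rfl⟩ := List.exists_cons_of_ne_nil hb
  simp only [PySem.List.pyGet?_zero_cons, Option.getD_some]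
  by_contra hc
  exact absurd h (not_le.mpr (List.Lex.rel (not_le.mp hc)))

-- A's word is sorted(cs): it is a permutation of cs and pairwise ≤
theorem pv_A_word (cs : List Char) :
    (@PySem.List.sorted (List Char) (List Char) List.instLinearOrder.toLT LinearOrder.toDecidableLT
        ((PySem.List.pyRange 0 (cs.length : Int)).foldl
          (fun acc i => acc ++ [PySem.List.slice cs (some i) none ++ PySem.List.slice cs none (some i)]) [])
        (fun x => x) false).foldl
      (fun acc item => acc ++ [(PySem.List.pyGet? item 0).getD ' ']) []
    = PySem.List.sorted cs (fun x => x) false := by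
  rw [pv_rotations_eq, PySem.List.foldl_append_singleton_eq_map, List.nil_append]
  set rots := (List.range cs.length).map
      (fun (k : Nat) => PySem.List.slice cs (some (k : Int)) none ++ PySem.List.slice cs none (some (k : Int))) with hrots
  have hlen : ∀ r ∈ rots, r ≠ [] := by
    intro r hr
    obtain ⟨k, hk, rfl⟩ := List.mem_map.mp hr
    have hk' : k < cs.length := List.mem_range.mp hk
    rw [PySem.List.slice_from_natCast, List.drop_eq_getElem_cons hk']
    apply List.ne_nil_of_length_pos
    rw [List.length_append, List.length_cons]
    omega
  symm
  apply PySem.List.sorted_id_eq_of_perm_of_pairwise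
  · have hp := (@PySem.List.sorted_perm (List Char) (List Char) List.instLinearOrder.toLT
        LinearOrder.toDecidableLT rots (fun x => x) false).map
      (fun item => (PySem.List.pyGet? item 0).getD ' ')
    rw [hrots] at hp
    rw [pv_heads_unsorted cs] at hp
    rw [hrots]
    exact hp
  · rw [List.pairwise_map]
    refine (PySem.List.sorted_pairwise rots (fun x => x)).imp_of_mem ?_
    intro a b hma hmb hab
    have hma' := (@PySem.List.mem_sorted (List Char) (List Char) List.instLinearOrder.toLT
        LinearOrder.toDecidableLT rots (fun x => x) false a).mp hma
    have hmb' := (@PySem.List.mem_sorted (List Char) (List Char) List.instLinearOrder.toLT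
        LinearOrder.toDecidableLT rots (fun x => x) false b).mp hmb
    exact pv_head_mono a b (hlen a hma') (hlen b hmb') hab

-- counting lemma: counting the elements of a flatMap of replicate-blocks over distinct keys
theorem pv_count_flatMap (ks : List Char) (f : Char → Nat) (hnd : ks.Nodup) (a : Char) :
    (ks.flatMap fun c => List.replicate (f c) c).count a = if a ∈ ks then f a else 0 := by
  induction ks with
  | nil => simp
  | cons k t ih =>
    rw [List.flatMap_cons, List.count_append, ih hnd.of_cons, List.count_replicate]
    rcases List.nodup_cons.mp hnd with ⟨hk, _⟩
    by_cases hak : a = k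
    · subst hak; simp [hk]
    · simp [hak, Ne.symm hak]

-- order lemma: the flatMap of replicate-blocks over strictly increasing keys is sorted
theorem pv_pairwise_flatMap (ks : List Char) (f : Char → Nat)
    (h : ks.Pairwise (· < ·)) :
    (ks.flatMap fun c => List.replicate (f c) c).Pairwise (· ≤ ·) := by
  induction ks with
  | nil => simp
  | cons k t ih =>
    rw [List.flatMap_cons, List.pairwise_append]
    rcases List.pairwise_cons.mp h with ⟨hk, ht⟩
    refine ⟨List.pairwise_replicate.mpr (Or.inr le_rfl), ih ht, ?_⟩
    intro x hx y hy
    obtain rfl := List.eq_of_mem_replicate hx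
    obtain ⟨c, hc, hyc⟩ := List.mem_flatMap.mp hy
    obtain rfl := List.eq_of_mem_replicate hyc
    exact le_of_lt (hk _ hc)

-- B's word is sorted(cs)
theorem pv_B_word (cs : List Char) :
    (PySem.List.sorted (cs.foldl (fun d ch => d.insert ch (d.getD ch 0 + 1))
          (PySem.Dict.empty : PySem.Dict Char Int)).keys
        (fun x => x) false).foldl
      (fun acc ch => acc ++ PySem.List.pyRepeat [ch]
        ((cs.foldl (fun d ch => d.insert ch (d.getD ch 0 + 1))
          (PySem.Dict.empty : PySem.Dict Char Int)).getD ch 0)) []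
    = PySem.List.sorted cs (fun x => x) false := by
  have hctr : cs.foldl (fun d ch => d.insert ch (d.getD ch 0 + 1))
      (PySem.Dict.empty : PySem.Dict Char Int) = PySem.Dict.counter cs := rfl
  rw [hctr, PySem.Dict.keys_counter, PySem.List.foldl_append_eq_flatMap, List.nil_append]
  simp only [PySem.Dict.getD_counter, PySem.List.pyRepeat_singleton, Int.toNat_natCast]
  set ks := PySem.List.sorted (PySem.Set.ofList cs) (fun x => x) false with hks
  have hpw : ks.Pairwise (· < ·) := PySem.List.sorted_ofList_pairwise_lt cs
  have hmem : ∀ a : Char, a ∈ ks ↔ a ∈ cs := by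
    intro a
    rw [hks, PySem.List.mem_sorted, PySem.Set.mem_ofList]
  symm
  apply PySem.List.sorted_id_eq_of_perm_of_pairwise
  · rw [List.perm_iff_count]
    intro a
    rw [pv_count_flatMap ks _ hpw.nodup a]
    by_cases ha : a ∈ cs
    · simp [(hmem a).mpr ha]
    · have hks : a ∉ ks := fun h' => ha ((hmem a).mp h')
      simp [hks, List.count_eq_zero_of_not_mem ha]
  · exact pv_pairwise_flatMap ks _ hpw

-- ===== VERDICT (by name: the statement is the Claim_ definition above) =====
theorem BWT_first_col_spec : Claim_equal_BWT_first_col := by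
  intro string _
  unfold Spec_BWT_first_col BWT_first_col BWT_first_col_alt
  exact congrArg String.ofList ((pv_A_word string.toList).trans (pv_B_word string.toList).symm)
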